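-- pv_equiv track=rewrite | github.com/Mohitnayak/agentic_RAG_medical_VR | app/scene/defs.py | resolve_definition
-- ===== SOURCE A (Python) =====
-- from typing import Optional
--
-- TERM_DEFINITIONS = {
--     "handles": "Handles are grabbable UI affordances used to adjust or manipulate scene elements precisely.",
--     "xray_flashlight": "X‑ray flashlight is a spotlight overlay that reveals X‑ray detail where aimed.",
--     "show_nerve": "Nerve overlay visualizes the mandibular canal to avoid nerve injury during planning.",
--     "show_sinus": "Sinus overlay outlines the maxillary sinus boundary for safe implant planning.",
--     "sinuses": "Sinus overlay outlines the maxillary sinus boundary for safe implant planning.",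
--     "align_implants": "Align implants realigns selected implants to a planned axis/prosthetic reference.",
--     "contrast": "Contrast controls the intensity difference in the X‑ray visualization (0–100).",
--     "brightness": "Brightness controls overall luminance of the X‑ray visualization (0–100).",
--     "implants": "Dental implants are virtual fixtures selectable by height (y) and length (z) for planning.",
-- }
--
-- SYNONYM_TO_TERM = {
--     "handles": "handles",
--     "handle": "handles",
--     "x-ray flashlight": "xray_flashlight",
--     "x ray flashlight": "xray_flashlight",
--     "xray flashlight": "xray_flashlight",
--     "nerve": "show_nerve",
--     "nerve overlay": "show_nerve",
--     "sinus": "show_sinus",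
--     "sinuses": "show_sinus",
--     "sinus overlay": "show_sinus",
--     "align implants": "align_implants",
--     "alignment": "align_implants",
--     "contrast": "contrast",
--     "brightness": "brightness",
--     "implants": "implants",
--     "dental implants": "implants",
-- }
--
-- def resolve_definition(question: str) -> Optional[str]:
--     q = question.strip().lower()
--     # Only trigger on definition intents to avoid overfiring
--     if not any(x in q for x in ["what is", "what are", "explain", "definition of", "tell me about"]):
--         return None
--     for syn in sorted(SYNONYM_TO_TERM.keys(), key=len, reverse=True):
--         if syn in q:
--             term = SYNONYM_TO_TERM[syn]
--             desc = TERM_DEFINITIONS.get(term)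
--             if desc:
--                 # Friendly name
--                 name = {
--                     "xray_flashlight": "X‑ray flashlight",
--                     "show_nerve": "nerve overlay",
--                     "show_sinus": "sinus overlay",
--                     "align_implants": "align implants",
--                 }.get(term, syn)
--                 return f"{name}: {desc}"
--     return None
-- ===== SOURCE B (Python) =====
-- from typing import Optional
--
-- TERM_DEFINITIONS = {
--     "handles": "Handles are grabbable UI affordances used to adjust or manipulate scene elements precisely.",
--     "xray_flashlight": "X\u2011ray flashlight is a spotlight overlay that reveals X\u2011ray detail where aimed.",
--     "show_nerve": "Nerve overlay visualizes the mandibular canal to avoid nerve injury during planning.",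
--     "show_sinus": "Sinus overlay outlines the maxillary sinus boundary for safe implant planning.",
--     "sinuses": "Sinus overlay outlines the maxillary sinus boundary for safe implant planning.",
--     "align_implants": "Align implants realigns selected implants to a planned axis/prosthetic reference.",
--     "contrast": "Contrast controls the intensity difference in the X\u2011ray visualization (0\u2013100).",
--     "brightness": "Brightness controls overall luminance of the X\u2011ray visualization (0\u2013100).",
--     "implants": "Dental implants are virtual fixtures selectable by height (y) and length (z) for planning.",
-- }
--
-- SYNONYM_TO_TERM = {
--     "handles": "handles",
--     "handle": "handles",
--     "x-ray flashlight": "xray_flashlight",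
--     "x ray flashlight": "xray_flashlight",
--     "xray flashlight": "xray_flashlight",
--     "nerve": "show_nerve",
--     "nerve overlay": "show_nerve",
--     "sinus": "show_sinus",
--     "sinuses": "show_sinus",
--     "sinus overlay": "show_sinus",
--     "align implants": "align_implants",
--     "alignment": "align_implants",
--     "contrast": "contrast",
--     "brightness": "brightness",
--     "implants": "implants",
--     "dental implants": "implants",
-- }
--
-- _FRIENDLY = {
--     "xray_flashlight": "X\u2011ray flashlight",
--     "show_nerve": "nerve overlay",
--     "show_sinus": "sinus overlay",
--     "align_implants": "align implants",
-- }
--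
-- def resolve_definition(question: str) -> Optional[str]:
--     q = question.strip().lower()
--     if not any(x in q for x in ["what is", "what are", "explain", "definition of", "tell me about"]):
--         return None
--     # single linear pass in insertion order; strict '>' keeps the earliest key on length ties,
--     # which reproduces the stable sort-by-length-descending selection
--     best_syn = None
--     best_term = None
--     best_len = -1
--     for syn, term in SYNONYM_TO_TERM.items():
--         if len(syn) > best_len and syn in q and TERM_DEFINITIONS.get(term):
--             best_syn, best_term, best_len = syn, term, len(syn)
--     if best_syn is None:
--         return None
--     desc = TERM_DEFINITIONS[best_term]
--     name = _FRIENDLY.get(best_term, best_syn)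
--     return f"{name}: {desc}"
-- ===== Notes on version B (the rewrite author's own statement) =====
-- stated objective: simpler
-- what changed: Replaces A's sort of all synonyms by length followed by a first-match scan with a single linear pass over the synonym dict in insertion order that keeps the longest matching synonym (strict '>' preserves A's stable-sort tie-breaking), rendering the answer once after the pass.
import Mathlib
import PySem

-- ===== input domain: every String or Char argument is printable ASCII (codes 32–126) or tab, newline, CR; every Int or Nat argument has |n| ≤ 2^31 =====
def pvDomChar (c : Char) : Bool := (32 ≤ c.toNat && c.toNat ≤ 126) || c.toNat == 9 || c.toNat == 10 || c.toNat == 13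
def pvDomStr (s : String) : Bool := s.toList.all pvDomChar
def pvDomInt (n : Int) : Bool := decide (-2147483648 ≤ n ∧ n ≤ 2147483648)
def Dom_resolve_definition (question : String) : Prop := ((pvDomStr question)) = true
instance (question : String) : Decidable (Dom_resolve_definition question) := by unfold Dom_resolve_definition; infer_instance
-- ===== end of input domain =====

-- B replaces A's sort-then-first-match scan by a single linear pass over the synonym table in
-- insertion order keeping the longest matching synonym (strict '>' reproduces the stable sort's
-- tie-breaking); objective: simpler (no sort).

-- shared module constants (the Python module's dicts, in insertion order)
set_option maxRecDepth 8000
set_option maxHeartbeats 1600000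

def pvTermDefs : PySem.Dict String String := PySem.Dict.ofList [
  ("handles", "Handles are grabbable UI affordances used to adjust or manipulate scene elements precisely."),
  ("xray_flashlight", "X‑ray flashlight is a spotlight overlay that reveals X‑ray detail where aimed."),
  ("show_nerve", "Nerve overlay visualizes the mandibular canal to avoid nerve injury during planning."),
  ("show_sinus", "Sinus overlay outlines the maxillary sinus boundary for safe implant planning."),
  ("sinuses", "Sinus overlay outlines the maxillary sinus boundary for safe implant planning."),
  ("align_implants", "Align implants realigns selected implants to a planned axis/prosthetic reference."),
  ("contrast", "Contrast controls the intensity difference in the X‑ray visualization (0–100)."),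
  ("brightness", "Brightness controls overall luminance of the X‑ray visualization (0–100)."),
  ("implants", "Dental implants are virtual fixtures selectable by height (y) and length (z) for planning.")]

def pvSynToTerm : PySem.Dict String String := PySem.Dict.ofList [("handles", "handles"), ("handle", "handles"), ("x-ray flashlight", "xray_flashlight"), ("x ray flashlight", "xray_flashlight"), ("xray flashlight", "xray_flashlight"), ("nerve", "show_nerve"), ("nerve overlay", "show_nerve"), ("sinus", "show_sinus"), ("sinuses", "show_sinus"), ("sinus overlay", "show_sinus"), ("align implants", "align_implants"), ("alignment", "align_implants"), ("contrast", "contrast"), ("brightness", "brightness"), ("implants", "implants"), ("dental implants", "implants")]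

def pvNameMap : PySem.Dict String String := PySem.Dict.ofList [("xray_flashlight", "X‑ray flashlight"), ("show_nerve", "nerve overlay"), ("show_sinus", "sinus overlay"), ("align_implants", "align implants")]

def pvIntents : List String := ["what is", "what are", "explain", "definition of", "tell me about"]

-- ===== PORT A =====
-- the for-loop over the sorted synonym list; `continue` on a missing or empty desc
def pvLoopA (q : String) : List String → Option String
  | [] => none
  | syn :: rest =>
    if PySem.Str.isIn syn q then
      let term := (PySem.Dict.get? pvSynToTerm syn).getD ""
      match PySem.Dict.get? pvTermDefs term with
      | some desc =>
        if desc = "" then pvLoopA q rest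
        else some (PySem.Str.join "" [PySem.Dict.getD pvNameMap term syn, ": ", desc])
      | none => pvLoopA q rest
    else pvLoopA q rest

def resolve_definition (question : String) : Option String :=
  if !(pvIntents.any (fun x => PySem.Str.isIn x (PySem.Str.lower (PySem.Str.strip question)))) then none
  else pvLoopA (PySem.Str.lower (PySem.Str.strip question))
         (PySem.List.sorted (PySem.Dict.keys pvSynToTerm) (fun s => PySem.Str.len s) true)

-- ===== PORT B =====
-- one loop step: keep (best (syn, term), best length); strict '>' on the length
def pvStepB (q : String) (st : Option (String × String) × Int) (p : String × String) :
    Option (String × String) × Int :=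
  if decide (st.2 < PySem.Str.len p.1) &&
     (PySem.Str.isIn p.1 q && !(PySem.Dict.getD pvTermDefs p.2 "" == "")) then
    (some p, PySem.Str.len p.1)
  else st

def pvScanB (q : String) : Option (String × String) × Int :=
  (PySem.Dict.items pvSynToTerm).foldl (pvStepB q) (none, -1)

-- after the loop: render the best candidate, if any
def pvPostB (q : String) : Option String :=
  match (pvScanB q).1 with
  | none => none
  | some (syn, term) =>
    some (PySem.Str.join "" [PySem.Dict.getD pvNameMap term syn, ": ",
          (PySem.Dict.get? pvTermDefs term).getD ""])

def resolve_definition_alt (question : String) : Option String :=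
  if !(pvIntents.any (fun x => PySem.Str.isIn x (PySem.Str.lower (PySem.Str.strip question)))) then none
  else pvPostB (PySem.Str.lower (PySem.Str.strip question))

-- ===== PRECONDITION & SPEC =====
def Spec_resolve_definition (question : String) (out : Option String) : Prop := out = resolve_definition_alt question
instance (question : String) (out : Option String) : Decidable (Spec_resolve_definition question out) := by unfold Spec_resolve_definition; infer_instance

-- ===== CLAIM (what is proved, stated in full; the proofs are below) =====
def Claim_equal_resolve_definition : Prop := ∀ (question : String), Dom_resolve_definition question → Spec_resolve_definition question (resolve_definition question)

-- ===== LEMMAS AND PROOFS =====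

-- the matching predicate of B's loop (synonym occurs in q and its definition is non-empty)
def pvP (q : String) (p : String × String) : Bool :=
  PySem.Str.isIn p.1 q && !(PySem.Dict.getD pvTermDefs p.2 "" == "")

theorem pvScan_skip (q : String) (L : List (String × String))
    (st : Option (String × String) × Int)
    (h : ∀ p ∈ L, pvP q p = false ∨ PySem.Str.len p.1 ≤ st.2) :
    L.foldl (pvStepB q) st = st := by
  induction L with
  | nil => rfl
  | cons p L ih =>
    have hstep : pvStepB q st p = st := by
      unfold pvStepB
      rcases h p (List.mem_cons_self) with hf | hle
      · rw [show (PySem.Str.isIn p.1 q && !(PySem.Dict.getD pvTermDefs p.2 "" == "")) = false from hf]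
        simp
      · rw [show decide (st.2 < PySem.Str.len p.1) = false from by
          rw [decide_eq_false_iff_not]; omega]
        simp
    rw [List.foldl_cons, hstep]
    exact ih (fun p hp => h p (List.mem_cons_of_mem _ hp))

theorem pvScan_lt (q : String) (L : List (String × String))
    (st : Option (String × String) × Int) (M : Int)
    (h : ∀ p ∈ L, pvP q p = false ∨ PySem.Str.len p.1 < M)
    (hst : st.2 < M) :
    (L.foldl (pvStepB q) st).2 < M := by
  induction L generalizing st with
  | nil => exact hst
  | cons p L ih =>
    rw [List.foldl_cons]
    apply ih _ (fun p hp => h p (List.mem_cons_of_mem _ hp))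
    unfold pvStepB
    split
    · next hc =>
      rcases h p (List.mem_cons_self) with hf | hlt
      · have hf' : (PySem.Str.isIn p.1 q && !(PySem.Dict.getD pvTermDefs p.2 "" == "")) = false := hf
        rw [Bool.and_eq_true] at hc
        exact absurd (hf'.symm.trans hc.2) Bool.false_ne_true
      · exact hlt
    · exact hst

theorem pvScan_main (q : String) (L1 L2 : List (String × String)) (m : String × String)
    (h1 : ∀ p ∈ L1, pvP q p = false ∨ PySem.Str.len p.1 < PySem.Str.len m.1)
    (hm : pvP q m = true)
    (h2 : ∀ p ∈ L2, pvP q p = false ∨ PySem.Str.len p.1 ≤ PySem.Str.len m.1) :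
    ((L1 ++ m :: L2).foldl (pvStepB q) (none, -1)).1 = some m := by
  rw [List.foldl_append, List.foldl_cons]
  have hlen0 : (0 : Int) ≤ PySem.Str.len m.1 := by
    rw [PySem.Str.len_eq]; exact_mod_cast Nat.zero_le _
  have hlt := pvScan_lt q L1 (none, -1) (PySem.Str.len m.1) h1 (by omega)
  have hstep : ∀ st : Option (String × String) × Int, st.2 < PySem.Str.len m.1 →
      pvStepB q st m = (some m, PySem.Str.len m.1) := by
    intro st hst
    unfold pvStepB
    rw [show (PySem.Str.isIn m.1 q && !(PySem.Dict.getD pvTermDefs m.2 "" == "")) = true from hm,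
      show decide (st.2 < PySem.Str.len m.1) = true from by rw [decide_eq_true_iff]; exact hst]
    simp
  rw [hstep _ hlt, pvScan_skip q L2 _ (fun p hp => h2 p hp)]

theorem pvSortedEval :
    PySem.List.sorted (PySem.Dict.keys pvSynToTerm) (fun s => PySem.Str.len s) true = ["x-ray flashlight", "x ray flashlight", "xray flashlight", "dental implants", "align implants", "nerve overlay", "sinus overlay", "brightness", "alignment", "contrast", "implants", "handles", "sinuses", "handle", "nerve", "sinus"] := by decide

theorem pvLoopA_cons (q syn : String) (rest : List String) :
    pvLoopA q (syn :: rest) =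
      if PySem.Str.isIn syn q then
        (let term := (PySem.Dict.get? pvSynToTerm syn).getD ""
         match PySem.Dict.get? pvTermDefs term with
         | some desc =>
           if desc = "" then pvLoopA q rest
           else some (PySem.Str.join "" [PySem.Dict.getD pvNameMap term syn, ": ", desc])
         | none => pvLoopA q rest)
      else pvLoopA q rest := rfl

theorem pvLoopA_false (q syn : String) (rest : List String)
    (h : PySem.Str.isIn syn q = false) :
    pvLoopA q (syn :: rest) = pvLoopA q rest := by
  rw [pvLoopA_cons, if_neg (by rw [h]; exact Bool.false_ne_true)]

theorem pvPostB_eq (q syn term : String)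
    (h : (pvScanB q).1 = some (syn, term)) :
    pvPostB q = some (PySem.Str.join "" [PySem.Dict.getD pvNameMap term syn, ": ",
      (PySem.Dict.get? pvTermDefs term).getD ""]) := by
  unfold pvPostB
  rw [h]

theorem pvPostB_none (q : String) (h : (pvScanB q).1 = none) : pvPostB q = none := by
  unfold pvPostB
  rw [h]

theorem resolve_definition_core (q : String) :
    pvLoopA q (PySem.List.sorted (PySem.Dict.keys pvSynToTerm) (fun s => PySem.Str.len s) true)
      = pvPostB q := by
  rw [pvSortedEval]
  cases h0 : PySem.Str.isIn "x-ray flashlight" q with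
  | true =>
    have hB : (pvScanB q).1 = some ("x-ray flashlight", "xray_flashlight") := by
      have hsplit : PySem.Dict.items pvSynToTerm = [("handles", "handles"), ("handle", "handles")] ++ ("x-ray flashlight", "xray_flashlight") :: [("x ray flashlight", "xray_flashlight"), ("xray flashlight", "xray_flashlight"), ("nerve", "show_nerve"), ("nerve overlay", "show_nerve"), ("sinus", "show_sinus"), ("sinuses", "show_sinus"), ("sinus overlay", "show_sinus"), ("align implants", "align_implants"), ("alignment", "align_implants"), ("contrast", "contrast"), ("brightness", "brightness"), ("implants", "implants"), ("dental implants", "implants")] := rfl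
      rw [pvScanB, hsplit]
      exact pvScan_main q _ _ _
        (by intro p hp; fin_cases hp <;> first | (right; decide) | (left; simp only [pvP, Bool.false_and]))
        (by simp only [pvP]; rw [h0]; decide)
        (by intro p hp; fin_cases hp <;> first | (right; decide) | (left; simp only [pvP, Bool.false_and]))
    rw [pvLoopA_cons, if_pos h0, pvPostB_eq q _ _ hB]
    conv_lhs => whnf
    decide
  | false =>
    cases h1 : PySem.Str.isIn "x ray flashlight" q with
    | true =>
      have hB : (pvScanB q).1 = some ("x ray flashlight", "xray_flashlight") := by
        have hsplit : PySem.Dict.items pvSynToTerm = [("handles", "handles"), ("handle", "handles"), ("x-ray flashlight", "xray_flashlight")] ++ ("x ray flashlight", "xray_flashlight") :: [("xray flashlight", "xray_flashlight"), ("nerve", "show_nerve"), ("nerve overlay", "show_nerve"), ("sinus", "show_sinus"), ("sinuses", "show_sinus"), ("sinus overlay", "show_sinus"), ("align implants", "align_implants"), ("alignment", "align_implants"), ("contrast", "contrast"), ("brightness", "brightness"), ("implants", "implants"), ("dental implants", "implants")] := rfl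
        rw [pvScanB, hsplit]
        exact pvScan_main q _ _ _
          (by intro p hp; fin_cases hp <;> first | (right; decide) | (left; simp only [pvP, h0, Bool.false_and]))
          (by simp only [pvP]; rw [h1]; decide)
          (by intro p hp; fin_cases hp <;> first | (right; decide) | (left; simp only [pvP, h0, Bool.false_and]))
      rw [pvLoopA_false _ _ _ h0, pvLoopA_cons, if_pos h1, pvPostB_eq q _ _ hB]
      conv_lhs => whnf
      decide
    | false =>
      cases h2 : PySem.Str.isIn "xray flashlight" q with
      | true =>
        have hB : (pvScanB q).1 = some ("xray flashlight", "xray_flashlight") := by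
          have hsplit : PySem.Dict.items pvSynToTerm = [("handles", "handles"), ("handle", "handles"), ("x-ray flashlight", "xray_flashlight"), ("x ray flashlight", "xray_flashlight")] ++ ("xray flashlight", "xray_flashlight") :: [("nerve", "show_nerve"), ("nerve overlay", "show_nerve"), ("sinus", "show_sinus"), ("sinuses", "show_sinus"), ("sinus overlay", "show_sinus"), ("align implants", "align_implants"), ("alignment", "align_implants"), ("contrast", "contrast"), ("brightness", "brightness"), ("implants", "implants"), ("dental implants", "implants")] := rfl
          rw [pvScanB, hsplit]
          exact pvScan_main q _ _ _
            (by intro p hp; fin_cases hp <;> first | (right; decide) | (left; simp only [pvP, h0, h1, Bool.false_and]))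
            (by simp only [pvP]; rw [h2]; decide)
            (by intro p hp; fin_cases hp <;> first | (right; decide) | (left; simp only [pvP, h0, h1, Bool.false_and]))
        rw [pvLoopA_false _ _ _ h0, pvLoopA_false _ _ _ h1, pvLoopA_cons, if_pos h2, pvPostB_eq q _ _ hB]
        conv_lhs => whnf
        decide
      | false =>
        cases h3 : PySem.Str.isIn "dental implants" q with
        | true =>
          have hB : (pvScanB q).1 = some ("dental implants", "implants") := by
            have hsplit : PySem.Dict.items pvSynToTerm = [("handles", "handles"), ("handle", "handles"), ("x-ray flashlight", "xray_flashlight"), ("x ray flashlight", "xray_flashlight"), ("xray flashlight", "xray_flashlight"), ("nerve", "show_nerve"), ("nerve overlay", "show_nerve"), ("sinus", "show_sinus"), ("sinuses", "show_sinus"), ("sinus overlay", "show_sinus"), ("align implants", "align_implants"), ("alignment", "align_implants"), ("contrast", "contrast"), ("brightness", "brightness"), ("implants", "implants")] ++ ("dental implants", "implants") :: [] := rfl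
            rw [pvScanB, hsplit]
            exact pvScan_main q _ _ _
              (by intro p hp; fin_cases hp <;> first | (right; decide) | (left; simp only [pvP, h0, h1, h2, Bool.false_and]))
              (by simp only [pvP]; rw [h3]; decide)
              (by intro p hp; fin_cases hp <;> first | (right; decide) | (left; simp only [pvP, h0, h1, h2, Bool.false_and]))
          rw [pvLoopA_false _ _ _ h0, pvLoopA_false _ _ _ h1, pvLoopA_false _ _ _ h2, pvLoopA_cons, if_pos h3, pvPostB_eq q _ _ hB]
          conv_lhs => whnf
          decide
        | false =>
          cases h4 : PySem.Str.isIn "align implants" q with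
          | true =>
            have hB : (pvScanB q).1 = some ("align implants", "align_implants") := by
              have hsplit : PySem.Dict.items pvSynToTerm = [("handles", "handles"), ("handle", "handles"), ("x-ray flashlight", "xray_flashlight"), ("x ray flashlight", "xray_flashlight"), ("xray flashlight", "xray_flashlight"), ("nerve", "show_nerve"), ("nerve overlay", "show_nerve"), ("sinus", "show_sinus"), ("sinuses", "show_sinus"), ("sinus overlay", "show_sinus")] ++ ("align implants", "align_implants") :: [("alignment", "align_implants"), ("contrast", "contrast"), ("brightness", "brightness"), ("implants", "implants"), ("dental implants", "implants")] := rfl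
              rw [pvScanB, hsplit]
              exact pvScan_main q _ _ _
                (by intro p hp; fin_cases hp <;> first | (right; decide) | (left; simp only [pvP, h0, h1, h2, h3, Bool.false_and]))
                (by simp only [pvP]; rw [h4]; decide)
                (by intro p hp; fin_cases hp <;> first | (right; decide) | (left; simp only [pvP, h0, h1, h2, h3, Bool.false_and]))
            rw [pvLoopA_false _ _ _ h0, pvLoopA_false _ _ _ h1, pvLoopA_false _ _ _ h2, pvLoopA_false _ _ _ h3, pvLoopA_cons, if_pos h4, pvPostB_eq q _ _ hB]
            conv_lhs => whnf
            decide
          | false =>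
            cases h5 : PySem.Str.isIn "nerve overlay" q with
            | true =>
              have hB : (pvScanB q).1 = some ("nerve overlay", "show_nerve") := by
                have hsplit : PySem.Dict.items pvSynToTerm = [("handles", "handles"), ("handle", "handles"), ("x-ray flashlight", "xray_flashlight"), ("x ray flashlight", "xray_flashlight"), ("xray flashlight", "xray_flashlight"), ("nerve", "show_nerve")] ++ ("nerve overlay", "show_nerve") :: [("sinus", "show_sinus"), ("sinuses", "show_sinus"), ("sinus overlay", "show_sinus"), ("align implants", "align_implants"), ("alignment", "align_implants"), ("contrast", "contrast"), ("brightness", "brightness"), ("implants", "implants"), ("dental implants", "implants")] := rfl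
                rw [pvScanB, hsplit]
                exact pvScan_main q _ _ _
                  (by intro p hp; fin_cases hp <;> first | (right; decide) | (left; simp only [pvP, h0, h1, h2, h3, h4, Bool.false_and]))
                  (by simp only [pvP]; rw [h5]; decide)
                  (by intro p hp; fin_cases hp <;> first | (right; decide) | (left; simp only [pvP, h0, h1, h2, h3, h4, Bool.false_and]))
              rw [pvLoopA_false _ _ _ h0, pvLoopA_false _ _ _ h1, pvLoopA_false _ _ _ h2, pvLoopA_false _ _ _ h3, pvLoopA_false _ _ _ h4, pvLoopA_cons, if_pos h5, pvPostB_eq q _ _ hB]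
              conv_lhs => whnf
              decide
            | false =>
              cases h6 : PySem.Str.isIn "sinus overlay" q with
              | true =>
                have hB : (pvScanB q).1 = some ("sinus overlay", "show_sinus") := by
                  have hsplit : PySem.Dict.items pvSynToTerm = [("handles", "handles"), ("handle", "handles"), ("x-ray flashlight", "xray_flashlight"), ("x ray flashlight", "xray_flashlight"), ("xray flashlight", "xray_flashlight"), ("nerve", "show_nerve"), ("nerve overlay", "show_nerve"), ("sinus", "show_sinus"), ("sinuses", "show_sinus")] ++ ("sinus overlay", "show_sinus") :: [("align implants", "align_implants"), ("alignment", "align_implants"), ("contrast", "contrast"), ("brightness", "brightness"), ("implants", "implants"), ("dental implants", "implants")] := rfl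
                  rw [pvScanB, hsplit]
                  exact pvScan_main q _ _ _
                    (by intro p hp; fin_cases hp <;> first | (right; decide) | (left; simp only [pvP, h0, h1, h2, h3, h4, h5, Bool.false_and]))
                    (by simp only [pvP]; rw [h6]; decide)
                    (by intro p hp; fin_cases hp <;> first | (right; decide) | (left; simp only [pvP, h0, h1, h2, h3, h4, h5, Bool.false_and]))
                rw [pvLoopA_false _ _ _ h0, pvLoopA_false _ _ _ h1, pvLoopA_false _ _ _ h2, pvLoopA_false _ _ _ h3, pvLoopA_false _ _ _ h4, pvLoopA_false _ _ _ h5, pvLoopA_cons, if_pos h6, pvPostB_eq q _ _ hB]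
                conv_lhs => whnf
                decide
              | false =>
                cases h7 : PySem.Str.isIn "brightness" q with
                | true =>
                  have hB : (pvScanB q).1 = some ("brightness", "brightness") := by
                    have hsplit : PySem.Dict.items pvSynToTerm = [("handles", "handles"), ("handle", "handles"), ("x-ray flashlight", "xray_flashlight"), ("x ray flashlight", "xray_flashlight"), ("xray flashlight", "xray_flashlight"), ("nerve", "show_nerve"), ("nerve overlay", "show_nerve"), ("sinus", "show_sinus"), ("sinuses", "show_sinus"), ("sinus overlay", "show_sinus"), ("align implants", "align_implants"), ("alignment", "align_implants"), ("contrast", "contrast")] ++ ("brightness", "brightness") :: [("implants", "implants"), ("dental implants", "implants")] := rfl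
                    rw [pvScanB, hsplit]
                    exact pvScan_main q _ _ _
                      (by intro p hp; fin_cases hp <;> first | (right; decide) | (left; simp only [pvP, h0, h1, h2, h3, h4, h5, h6, Bool.false_and]))
                      (by simp only [pvP]; rw [h7]; decide)
                      (by intro p hp; fin_cases hp <;> first | (right; decide) | (left; simp only [pvP, h0, h1, h2, h3, h4, h5, h6, Bool.false_and]))
                  rw [pvLoopA_false _ _ _ h0, pvLoopA_false _ _ _ h1, pvLoopA_false _ _ _ h2, pvLoopA_false _ _ _ h3, pvLoopA_false _ _ _ h4, pvLoopA_false _ _ _ h5, pvLoopA_false _ _ _ h6, pvLoopA_cons, if_pos h7, pvPostB_eq q _ _ hB]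
                  conv_lhs => whnf
                  decide
                | false =>
                  cases h8 : PySem.Str.isIn "alignment" q with
                  | true =>
                    have hB : (pvScanB q).1 = some ("alignment", "align_implants") := by
                      have hsplit : PySem.Dict.items pvSynToTerm = [("handles", "handles"), ("handle", "handles"), ("x-ray flashlight", "xray_flashlight"), ("x ray flashlight", "xray_flashlight"), ("xray flashlight", "xray_flashlight"), ("nerve", "show_nerve"), ("nerve overlay", "show_nerve"), ("sinus", "show_sinus"), ("sinuses", "show_sinus"), ("sinus overlay", "show_sinus"), ("align implants", "align_implants")] ++ ("alignment", "align_implants") :: [("contrast", "contrast"), ("brightness", "brightness"), ("implants", "implants"), ("dental implants", "implants")] := rfl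
                      rw [pvScanB, hsplit]
                      exact pvScan_main q _ _ _
                        (by intro p hp; fin_cases hp <;> first | (right; decide) | (left; simp only [pvP, h0, h1, h2, h3, h4, h5, h6, h7, Bool.false_and]))
                        (by simp only [pvP]; rw [h8]; decide)
                        (by intro p hp; fin_cases hp <;> first | (right; decide) | (left; simp only [pvP, h0, h1, h2, h3, h4, h5, h6, h7, Bool.false_and]))
                    rw [pvLoopA_false _ _ _ h0, pvLoopA_false _ _ _ h1, pvLoopA_false _ _ _ h2, pvLoopA_false _ _ _ h3, pvLoopA_false _ _ _ h4, pvLoopA_false _ _ _ h5, pvLoopA_false _ _ _ h6, pvLoopA_false _ _ _ h7, pvLoopA_cons, if_pos h8, pvPostB_eq q _ _ hB]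
                    conv_lhs => whnf
                    decide
                  | false =>
                    cases h9 : PySem.Str.isIn "contrast" q with
                    | true =>
                      have hB : (pvScanB q).1 = some ("contrast", "contrast") := by
                        have hsplit : PySem.Dict.items pvSynToTerm = [("handles", "handles"), ("handle", "handles"), ("x-ray flashlight", "xray_flashlight"), ("x ray flashlight", "xray_flashlight"), ("xray flashlight", "xray_flashlight"), ("nerve", "show_nerve"), ("nerve overlay", "show_nerve"), ("sinus", "show_sinus"), ("sinuses", "show_sinus"), ("sinus overlay", "show_sinus"), ("align implants", "align_implants"), ("alignment", "align_implants")] ++ ("contrast", "contrast") :: [("brightness", "brightness"), ("implants", "implants"), ("dental implants", "implants")] := rfl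
                        rw [pvScanB, hsplit]
                        exact pvScan_main q _ _ _
                          (by intro p hp; fin_cases hp <;> first | (right; decide) | (left; simp only [pvP, h0, h1, h2, h3, h4, h5, h6, h7, h8, Bool.false_and]))
                          (by simp only [pvP]; rw [h9]; decide)
                          (by intro p hp; fin_cases hp <;> first | (right; decide) | (left; simp only [pvP, h0, h1, h2, h3, h4, h5, h6, h7, h8, Bool.false_and]))
                      rw [pvLoopA_false _ _ _ h0, pvLoopA_false _ _ _ h1, pvLoopA_false _ _ _ h2, pvLoopA_false _ _ _ h3, pvLoopA_false _ _ _ h4, pvLoopA_false _ _ _ h5, pvLoopA_false _ _ _ h6, pvLoopA_false _ _ _ h7, pvLoopA_false _ _ _ h8, pvLoopA_cons, if_pos h9, pvPostB_eq q _ _ hB]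
                      conv_lhs => whnf
                      decide
                    | false =>
                      cases h10 : PySem.Str.isIn "implants" q with
                      | true =>
                        have hB : (pvScanB q).1 = some ("implants", "implants") := by
                          have hsplit : PySem.Dict.items pvSynToTerm = [("handles", "handles"), ("handle", "handles"), ("x-ray flashlight", "xray_flashlight"), ("x ray flashlight", "xray_flashlight"), ("xray flashlight", "xray_flashlight"), ("nerve", "show_nerve"), ("nerve overlay", "show_nerve"), ("sinus", "show_sinus"), ("sinuses", "show_sinus"), ("sinus overlay", "show_sinus"), ("align implants", "align_implants"), ("alignment", "align_implants"), ("contrast", "contrast"), ("brightness", "brightness")] ++ ("implants", "implants") :: [("dental implants", "implants")] := rfl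
                          rw [pvScanB, hsplit]
                          exact pvScan_main q _ _ _
                            (by intro p hp; fin_cases hp <;> first | (right; decide) | (left; simp only [pvP, h0, h1, h2, h3, h4, h5, h6, h7, h8, h9, Bool.false_and]))
                            (by simp only [pvP]; rw [h10]; decide)
                            (by intro p hp; fin_cases hp <;> first | (right; decide) | (left; simp only [pvP, h0, h1, h2, h3, h4, h5, h6, h7, h8, h9, Bool.false_and]))
                        rw [pvLoopA_false _ _ _ h0, pvLoopA_false _ _ _ h1, pvLoopA_false _ _ _ h2, pvLoopA_false _ _ _ h3, pvLoopA_false _ _ _ h4, pvLoopA_false _ _ _ h5, pvLoopA_false _ _ _ h6, pvLoopA_false _ _ _ h7, pvLoopA_false _ _ _ h8, pvLoopA_false _ _ _ h9, pvLoopA_cons, if_pos h10, pvPostB_eq q _ _ hB]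
                        conv_lhs => whnf
                        decide
                      | false =>
                        cases h11 : PySem.Str.isIn "handles" q with
                        | true =>
                          have hB : (pvScanB q).1 = some ("handles", "handles") := by
                            have hsplit : PySem.Dict.items pvSynToTerm = [] ++ ("handles", "handles") :: [("handle", "handles"), ("x-ray flashlight", "xray_flashlight"), ("x ray flashlight", "xray_flashlight"), ("xray flashlight", "xray_flashlight"), ("nerve", "show_nerve"), ("nerve overlay", "show_nerve"), ("sinus", "show_sinus"), ("sinuses", "show_sinus"), ("sinus overlay", "show_sinus"), ("align implants", "align_implants"), ("alignment", "align_implants"), ("contrast", "contrast"), ("brightness", "brightness"), ("implants", "implants"), ("dental implants", "implants")] := rfl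
                            rw [pvScanB, hsplit]
                            exact pvScan_main q _ _ _
                              (by intro p hp; fin_cases hp <;> first | (right; decide) | (left; simp only [pvP, h0, h1, h2, h3, h4, h5, h6, h7, h8, h9, h10, Bool.false_and]))
                              (by simp only [pvP]; rw [h11]; decide)
                              (by intro p hp; fin_cases hp <;> first | (right; decide) | (left; simp only [pvP, h0, h1, h2, h3, h4, h5, h6, h7, h8, h9, h10, Bool.false_and]))
                          rw [pvLoopA_false _ _ _ h0, pvLoopA_false _ _ _ h1, pvLoopA_false _ _ _ h2, pvLoopA_false _ _ _ h3, pvLoopA_false _ _ _ h4, pvLoopA_false _ _ _ h5, pvLoopA_false _ _ _ h6, pvLoopA_false _ _ _ h7, pvLoopA_false _ _ _ h8, pvLoopA_false _ _ _ h9, pvLoopA_false _ _ _ h10, pvLoopA_cons, if_pos h11, pvPostB_eq q _ _ hB]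
                          conv_lhs => whnf
                          decide
                        | false =>
                          cases h12 : PySem.Str.isIn "sinuses" q with
                          | true =>
                            have hB : (pvScanB q).1 = some ("sinuses", "show_sinus") := by
                              have hsplit : PySem.Dict.items pvSynToTerm = [("handles", "handles"), ("handle", "handles"), ("x-ray flashlight", "xray_flashlight"), ("x ray flashlight", "xray_flashlight"), ("xray flashlight", "xray_flashlight"), ("nerve", "show_nerve"), ("nerve overlay", "show_nerve"), ("sinus", "show_sinus")] ++ ("sinuses", "show_sinus") :: [("sinus overlay", "show_sinus"), ("align implants", "align_implants"), ("alignment", "align_implants"), ("contrast", "contrast"), ("brightness", "brightness"), ("implants", "implants"), ("dental implants", "implants")] := rfl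
                              rw [pvScanB, hsplit]
                              exact pvScan_main q _ _ _
                                (by intro p hp; fin_cases hp <;> first | (right; decide) | (left; simp only [pvP, h0, h1, h2, h3, h4, h5, h6, h7, h8, h9, h10, h11, Bool.false_and]))
                                (by simp only [pvP]; rw [h12]; decide)
                                (by intro p hp; fin_cases hp <;> first | (right; decide) | (left; simp only [pvP, h0, h1, h2, h3, h4, h5, h6, h7, h8, h9, h10, h11, Bool.false_and]))
                            rw [pvLoopA_false _ _ _ h0, pvLoopA_false _ _ _ h1, pvLoopA_false _ _ _ h2, pvLoopA_false _ _ _ h3, pvLoopA_false _ _ _ h4, pvLoopA_false _ _ _ h5, pvLoopA_false _ _ _ h6, pvLoopA_false _ _ _ h7, pvLoopA_false _ _ _ h8, pvLoopA_false _ _ _ h9, pvLoopA_false _ _ _ h10, pvLoopA_false _ _ _ h11, pvLoopA_cons, if_pos h12, pvPostB_eq q _ _ hB]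
                            conv_lhs => whnf
                            decide
                          | false =>
                            cases h13 : PySem.Str.isIn "handle" q with
                            | true =>
                              have hB : (pvScanB q).1 = some ("handle", "handles") := by
                                have hsplit : PySem.Dict.items pvSynToTerm = [("handles", "handles")] ++ ("handle", "handles") :: [("x-ray flashlight", "xray_flashlight"), ("x ray flashlight", "xray_flashlight"), ("xray flashlight", "xray_flashlight"), ("nerve", "show_nerve"), ("nerve overlay", "show_nerve"), ("sinus", "show_sinus"), ("sinuses", "show_sinus"), ("sinus overlay", "show_sinus"), ("align implants", "align_implants"), ("alignment", "align_implants"), ("contrast", "contrast"), ("brightness", "brightness"), ("implants", "implants"), ("dental implants", "implants")] := rfl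
                                rw [pvScanB, hsplit]
                                exact pvScan_main q _ _ _
                                  (by intro p hp; fin_cases hp <;> first | (right; decide) | (left; simp only [pvP, h0, h1, h2, h3, h4, h5, h6, h7, h8, h9, h10, h11, h12, Bool.false_and]))
                                  (by simp only [pvP]; rw [h13]; decide)
                                  (by intro p hp; fin_cases hp <;> first | (right; decide) | (left; simp only [pvP, h0, h1, h2, h3, h4, h5, h6, h7, h8, h9, h10, h11, h12, Bool.false_and]))
                              rw [pvLoopA_false _ _ _ h0, pvLoopA_false _ _ _ h1, pvLoopA_false _ _ _ h2, pvLoopA_false _ _ _ h3, pvLoopA_false _ _ _ h4, pvLoopA_false _ _ _ h5, pvLoopA_false _ _ _ h6, pvLoopA_false _ _ _ h7, pvLoopA_false _ _ _ h8, pvLoopA_false _ _ _ h9, pvLoopA_false _ _ _ h10, pvLoopA_false _ _ _ h11, pvLoopA_false _ _ _ h12, pvLoopA_cons, if_pos h13, pvPostB_eq q _ _ hB]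
                              conv_lhs => whnf
                              decide
                            | false =>
                              cases h14 : PySem.Str.isIn "nerve" q with
                              | true =>
                                have hB : (pvScanB q).1 = some ("nerve", "show_nerve") := by
                                  have hsplit : PySem.Dict.items pvSynToTerm = [("handles", "handles"), ("handle", "handles"), ("x-ray flashlight", "xray_flashlight"), ("x ray flashlight", "xray_flashlight"), ("xray flashlight", "xray_flashlight")] ++ ("nerve", "show_nerve") :: [("nerve overlay", "show_nerve"), ("sinus", "show_sinus"), ("sinuses", "show_sinus"), ("sinus overlay", "show_sinus"), ("align implants", "align_implants"), ("alignment", "align_implants"), ("contrast", "contrast"), ("brightness", "brightness"), ("implants", "implants"), ("dental implants", "implants")] := rfl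
                                  rw [pvScanB, hsplit]
                                  exact pvScan_main q _ _ _
                                    (by intro p hp; fin_cases hp <;> first | (right; decide) | (left; simp only [pvP, h0, h1, h2, h3, h4, h5, h6, h7, h8, h9, h10, h11, h12, h13, Bool.false_and]))
                                    (by simp only [pvP]; rw [h14]; decide)
                                    (by intro p hp; fin_cases hp <;> first | (right; decide) | (left; simp only [pvP, h0, h1, h2, h3, h4, h5, h6, h7, h8, h9, h10, h11, h12, h13, Bool.false_and]))
                                rw [pvLoopA_false _ _ _ h0, pvLoopA_false _ _ _ h1, pvLoopA_false _ _ _ h2, pvLoopA_false _ _ _ h3, pvLoopA_false _ _ _ h4, pvLoopA_false _ _ _ h5, pvLoopA_false _ _ _ h6, pvLoopA_false _ _ _ h7, pvLoopA_false _ _ _ h8, pvLoopA_false _ _ _ h9, pvLoopA_false _ _ _ h10, pvLoopA_false _ _ _ h11, pvLoopA_false _ _ _ h12, pvLoopA_false _ _ _ h13, pvLoopA_cons, if_pos h14, pvPostB_eq q _ _ hB]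
                                conv_lhs => whnf
                                decide
                              | false =>
                                cases h15 : PySem.Str.isIn "sinus" q with
                                | true =>
                                  have hB : (pvScanB q).1 = some ("sinus", "show_sinus") := by
                                    have hsplit : PySem.Dict.items pvSynToTerm = [("handles", "handles"), ("handle", "handles"), ("x-ray flashlight", "xray_flashlight"), ("x ray flashlight", "xray_flashlight"), ("xray flashlight", "xray_flashlight"), ("nerve", "show_nerve"), ("nerve overlay", "show_nerve")] ++ ("sinus", "show_sinus") :: [("sinuses", "show_sinus"), ("sinus overlay", "show_sinus"), ("align implants", "align_implants"), ("alignment", "align_implants"), ("contrast", "contrast"), ("brightness", "brightness"), ("implants", "implants"), ("dental implants", "implants")] := rfl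
                                    rw [pvScanB, hsplit]
                                    exact pvScan_main q _ _ _
                                      (by intro p hp; fin_cases hp <;> first | (right; decide) | (left; simp only [pvP, h0, h1, h2, h3, h4, h5, h6, h7, h8, h9, h10, h11, h12, h13, h14, Bool.false_and]))
                                      (by simp only [pvP]; rw [h15]; decide)
                                      (by intro p hp; fin_cases hp <;> first | (right; decide) | (left; simp only [pvP, h0, h1, h2, h3, h4, h5, h6, h7, h8, h9, h10, h11, h12, h13, h14, Bool.false_and]))
                                  rw [pvLoopA_false _ _ _ h0, pvLoopA_false _ _ _ h1, pvLoopA_false _ _ _ h2, pvLoopA_false _ _ _ h3, pvLoopA_false _ _ _ h4, pvLoopA_false _ _ _ h5, pvLoopA_false _ _ _ h6, pvLoopA_false _ _ _ h7, pvLoopA_false _ _ _ h8, pvLoopA_false _ _ _ h9, pvLoopA_false _ _ _ h10, pvLoopA_false _ _ _ h11, pvLoopA_false _ _ _ h12, pvLoopA_false _ _ _ h13, pvLoopA_false _ _ _ h14, pvLoopA_cons, if_pos h15, pvPostB_eq q _ _ hB]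
                                  conv_lhs => whnf
                                  decide
                                | false =>
                                  have hB : (pvScanB q).1 = none := by
                                    rw [pvScanB, pvScan_skip q _ _ (by intro p hp; fin_cases hp <;> exact Or.inl (by simp only [pvP, h0, h1, h2, h3, h4, h5, h6, h7, h8, h9, h10, h11, h12, h13, h14, h15, Bool.false_and]))]
                                  rw [pvLoopA_false _ _ _ h0, pvLoopA_false _ _ _ h1, pvLoopA_false _ _ _ h2, pvLoopA_false _ _ _ h3, pvLoopA_false _ _ _ h4, pvLoopA_false _ _ _ h5, pvLoopA_false _ _ _ h6, pvLoopA_false _ _ _ h7, pvLoopA_false _ _ _ h8, pvLoopA_false _ _ _ h9, pvLoopA_false _ _ _ h10, pvLoopA_false _ _ _ h11, pvLoopA_false _ _ _ h12, pvLoopA_false _ _ _ h13, pvLoopA_false _ _ _ h14, pvLoopA_false _ _ _ h15, pvPostB_none q hB]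
                                  rfl

-- ===== VERDICT (by name: the statement is the Claim_ definition above) =====
theorem resolve_definition_spec : Claim_equal_resolve_definition := by
  intro question _
  unfold Spec_resolve_definition resolve_definition resolve_definition_alt
  by_cases hc : (!(pvIntents.any (fun x => PySem.Str.isIn x (PySem.Str.lower (PySem.Str.strip question))))) = true
  · rw [if_pos hc, if_pos hc]
  · rw [if_neg hc, if_neg hc]
    exact resolve_definition_core _
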